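-- pv_equiv track=rewrite | github.com/aalacy/storelocatore-scrapers | apify/ridhohariono/storelocator/kbane_com/scrape.py | singleQuoteToDoubleQuote
-- ===== SOURCE A (Python) =====
-- def singleQuoteToDoubleQuote(singleQuoted):
--     cList = list(singleQuoted)
--     inDouble = False
--     inSingle = False
--     for i, c in enumerate(cList):
--         if c == "'":
--             if not inDouble:
--                 inSingle = not inSingle
--                 cList[i] = '"'
--         elif c == '"':
--             inDouble = not inDouble
--     doubleQuoted = "".join(cList)
--     return doubleQuoted
-- ===== SOURCE B (Python) =====
-- def singleQuoteToDoubleQuote(singleQuoted):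
--     # Segments split on '"': even-indexed ones are outside double quotes.
--     segs = singleQuoted.split('"')
--     return '"'.join(
--         ''.join('"' if ch == "'" else ch for ch in seg) if i % 2 == 0 else seg
--         for i, seg in enumerate(segs)
--     )
-- ===== Notes on version B (the rewrite author's own statement) =====
-- stated objective: alternative
-- what changed: Replaces the per-character state-machine scan (inDouble/inSingle flags with in-place list mutation) by splitting on the double-quote character, replacing single quotes only in the even-indexed (outside) segments, and joining back.
import Mathlib
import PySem

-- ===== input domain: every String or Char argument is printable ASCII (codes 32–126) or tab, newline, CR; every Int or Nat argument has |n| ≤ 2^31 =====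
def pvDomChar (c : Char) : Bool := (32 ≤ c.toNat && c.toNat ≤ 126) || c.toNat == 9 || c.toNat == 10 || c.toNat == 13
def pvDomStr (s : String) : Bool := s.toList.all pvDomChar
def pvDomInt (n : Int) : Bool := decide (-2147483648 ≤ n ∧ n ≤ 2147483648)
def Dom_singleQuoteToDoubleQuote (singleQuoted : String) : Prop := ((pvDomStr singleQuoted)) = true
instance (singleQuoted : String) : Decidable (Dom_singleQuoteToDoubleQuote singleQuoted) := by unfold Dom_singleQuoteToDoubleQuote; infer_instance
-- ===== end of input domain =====

-- B replaces A's per-character state-machine scan by split-on-'"' / replace-in-even-segments / join (alternative decomposition, same cost).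

-- ===== PORT A =====
-- the for-loop over enumerate(cList) with the (inDouble, inSingle) flags and in-place update, as structural recursion
def sqdqGoA : List Char → Bool → Bool → List Char
  | [], _, _ => []
  | c :: rest, inDouble, inSingle =>
      if c = '\'' then
        if !inDouble then '"' :: sqdqGoA rest inDouble (!inSingle)
        else c :: sqdqGoA rest inDouble inSingle
      else if c = '"' then c :: sqdqGoA rest (!inDouble) inSingle
      else c :: sqdqGoA rest inDouble inSingle

def singleQuoteToDoubleQuote (singleQuoted : String) : String :=
  String.ofList (sqdqGoA singleQuoted.toList false false)

-- ===== PORT B =====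
-- ''.join('"' if ch == "'" else ch for ch in seg)
def sqdqRepSeg (seg : String) : String :=
  String.ofList (seg.toList.map (fun ch => if ch = '\'' then '"' else ch))

-- segs = singleQuoted.split('"'); '"'.join(rep(seg) if i % 2 == 0 else seg for i, seg in enumerate(segs))
def singleQuoteToDoubleQuote_alt (singleQuoted : String) : String :=
  let segs := (PySem.Chars.splitOn singleQuoted.toList ['"']).map String.ofList
  PySem.Str.join "\"" ((PySem.List.enumerate segs).map
    (fun p => if p.1 % 2 == 0 then sqdqRepSeg p.2 else p.2))

-- ===== PRECONDITION & SPEC =====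
def Spec_singleQuoteToDoubleQuote (singleQuoted : String) (out : String) : Prop := out = singleQuoteToDoubleQuote_alt singleQuoted
instance (singleQuoted : String) (out : String) : Decidable (Spec_singleQuoteToDoubleQuote singleQuoted out) := by unfold Spec_singleQuoteToDoubleQuote; infer_instance

-- ===== CLAIM (what is proved, stated in full; the proofs are below) =====
def Claim_equal_singleQuoteToDoubleQuote : Prop := ∀ (singleQuoted : String), Dom_singleQuoteToDoubleQuote singleQuoted → Spec_singleQuoteToDoubleQuote singleQuoted (singleQuoteToDoubleQuote singleQuoted)

-- ===== LEMMAS AND PROOFS =====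

-- plain recursive split on a single character (proof-side model of Chars.splitOn s [c])
def sqdqSplit (c : Char) : List Char → List (List Char)
  | [] => [[]]
  | x :: xs =>
      if x = c then [] :: sqdqSplit c xs
      else
        match sqdqSplit c xs with
        | r :: rs => (x :: r) :: rs
        | [] => [[x]]

theorem sqdqSplit_ne_nil (c : Char) (l : List Char) : sqdqSplit c l ≠ [] := by
  induction l with
  | nil => simp [sqdqSplit]
  | cons x xs ih =>
      simp only [sqdqSplit]
      split
      · simp
      · rcases h : sqdqSplit c xs with _ | ⟨r, rs⟩
        · simp
        · simp

-- prepend to the head segment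
def sqdqConsHead (p : List Char) : List (List Char) → List (List Char)
  | [] => [p]
  | r :: rs => (p ++ r) :: rs

theorem sqdqGo_spec (c : Char) (l : List Char) : ∀ (fuel : Nat) (cur : List Char)
    (acc : List (List Char)), l.length ≤ fuel →
    PySem.Chars.splitOn.go [c] fuel l cur acc
      = acc.reverse ++ sqdqConsHead cur.reverse (sqdqSplit c l) := by
  induction l with
  | nil =>
      intro fuel cur acc _
      cases fuel with
      | zero => simp [PySem.Chars.splitOn.go, sqdqSplit, sqdqConsHead]
      | succ f => simp [PySem.Chars.splitOn.go, sqdqSplit, sqdqConsHead]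
  | cons x xs ih =>
      intro fuel cur acc hf
      cases fuel with
      | zero => simp at hf
      | succ f =>
          by_cases hx : x = c
          · subst hx
            simp only [PySem.Chars.splitOn.go]
            rw [if_pos (by simp [List.isPrefixOf])]
            simp only [List.length_cons, List.length_nil, List.drop_succ_cons, List.drop_zero]
            rw [ih f [] (cur.reverse :: acc) (by simp at hf; omega)]
            have hsplit : sqdqSplit x (x :: xs) = [] :: sqdqSplit x xs := by
              simp [sqdqSplit]
            rcases h : sqdqSplit x xs with _ | ⟨r, rs⟩
            · exact absurd h (sqdqSplit_ne_nil x xs)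
            · simp [hsplit, h, sqdqConsHead]
          · simp only [PySem.Chars.splitOn.go]
            rw [if_neg (by simp [List.isPrefixOf]; exact fun hcx => absurd hcx.symm hx)]
            rw [ih f (x :: cur) acc (by simp at hf; omega)]
            simp only [sqdqSplit, if_neg hx]
            rcases h : sqdqSplit c xs with _ | ⟨r, rs⟩
            · exact absurd h (sqdqSplit_ne_nil c xs)
            · simp [sqdqConsHead]

theorem splitOn_singleton (c : Char) (l : List Char) :
    PySem.Chars.splitOn l [c] = sqdqSplit c l := by
  unfold PySem.Chars.splitOn
  rw [sqdqGo_spec c l (l.length + 1) [] [] (by omega)]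
  rcases h : sqdqSplit c l with _ | ⟨r, rs⟩
  · exact absurd h (sqdqSplit_ne_nil c l)
  · simp [sqdqConsHead]

def sqdqRep (l : List Char) : List Char := l.map (fun ch => if ch = '\'' then '"' else ch)

-- process segments with alternating state: outside segments replaced, inside kept
def sqdqProc : Bool → List (List Char) → List (List Char)
  | _, [] => []
  | d, x :: xs => (if d then x else sqdqRep x) :: sqdqProc (!d) xs

-- joining a nonempty-headed segment list: the head's first char comes out front
theorem join_cons_head (x : Char) (p : List Char) (rest : List (List Char)) :
    PySem.Chars.join ['"'] ((x :: p) :: rest) = x :: PySem.Chars.join ['"'] (p :: rest) := by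
  cases rest with
  | nil => rw [PySem.Chars.join_singleton, PySem.Chars.join_singleton]
  | cons b t => rw [PySem.Chars.join_cons_cons, PySem.Chars.join_cons_cons]; simp

theorem join_nil_head (rest : List (List Char)) (hne : rest ≠ []) :
    PySem.Chars.join ['"'] ([] :: rest) = '"' :: PySem.Chars.join ['"'] rest := by
  cases rest with
  | nil => exact absurd rfl hne
  | cons b t => rw [PySem.Chars.join_cons_cons]; simp

-- the state machine equals: split on '"', alternately replace, join with '"'
theorem goA_eq (l : List Char) : ∀ (d s : Bool),
    sqdqGoA l d s = PySem.Chars.join ['"'] (sqdqProc d (sqdqSplit '"' l)) := by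
  induction l with
  | nil =>
      intro d s
      cases d <;> simp [sqdqGoA, sqdqSplit, sqdqProc, sqdqRep, PySem.Chars.join_singleton]
  | cons x xs ih =>
      intro d s
      rcases h : sqdqSplit '"' xs with _ | ⟨r, rs⟩
      · exact absurd h (sqdqSplit_ne_nil _ _)
      by_cases hq : x = '"'
      · subst hq
        have hs : sqdqSplit '"' ('"' :: xs) = [] :: r :: rs := by simp [sqdqSplit, h]
        have hg : sqdqGoA ('"' :: xs) d s = '"' :: sqdqGoA xs (!d) s := by simp [sqdqGoA]
        have hp : sqdqProc d ([] :: r :: rs) = [] :: sqdqProc (!d) (r :: rs) := by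
          cases d <;> simp [sqdqProc, sqdqRep]
        rw [hg, hs, hp, join_nil_head _ (by simp [sqdqProc]), ih (!d) s, h]
      · have hs : sqdqSplit '"' (x :: xs) = (x :: r) :: rs := by
          simp [sqdqSplit, if_neg hq, h]
        by_cases hx : x = '\''
        · subst hx
          cases d with
          | false =>
              have hg : sqdqGoA ('\'' :: xs) false s = '"' :: sqdqGoA xs false (!s) := by
                simp [sqdqGoA]
              have hp : sqdqProc false (('\'' :: r) :: rs) = ('"' :: sqdqRep r) :: sqdqProc true rs := by
                simp [sqdqProc, sqdqRep]
              have hp2 : sqdqProc false (r :: rs) = sqdqRep r :: sqdqProc true rs := by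
                simp [sqdqProc]
              rw [hg, hs, hp, join_cons_head, ih false (!s), h, hp2]
          | true =>
              have hg : sqdqGoA ('\'' :: xs) true s = '\'' :: sqdqGoA xs true s := by
                simp [sqdqGoA]
              have hp : sqdqProc true (('\'' :: r) :: rs) = ('\'' :: r) :: sqdqProc false rs := by
                simp [sqdqProc]
              have hp2 : sqdqProc true (r :: rs) = r :: sqdqProc false rs := by
                simp [sqdqProc]
              rw [hg, hs, hp, join_cons_head, ih true s, h, hp2]
        · have hg : sqdqGoA (x :: xs) d s = x :: sqdqGoA xs d s := by
            simp [sqdqGoA, hq, hx]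
          cases d with
          | false =>
              have hp : sqdqProc false ((x :: r) :: rs) = (x :: sqdqRep r) :: sqdqProc true rs := by
                simp [sqdqProc, sqdqRep, hx]
              have hp2 : sqdqProc false (r :: rs) = sqdqRep r :: sqdqProc true rs := by
                simp [sqdqProc]
              rw [hg, hs, hp, join_cons_head, ih false s, h, hp2]
          | true =>
              have hp : sqdqProc true ((x :: r) :: rs) = (x :: r) :: sqdqProc false rs := by
                simp [sqdqProc]
              have hp2 : sqdqProc true (r :: rs) = r :: sqdqProc false rs := by
                simp [sqdqProc]
              rw [hg, hs, hp, join_cons_head, ih true s, h, hp2]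

-- the enumerate/parity map equals sqdqProc, with the start index's parity as state
theorem enumerate_parity (segs : List (List Char)) : ∀ (n : Int),
    ((PySem.List.enumerate (segs.map String.ofList) n).map
      (fun p => if p.1 % 2 == 0 then sqdqRepSeg p.2 else p.2)).map String.toList
      = sqdqProc (n % 2 != 0) segs := by
  induction segs with
  | nil => intro n; simp [PySem.List.enumerate_nil, sqdqProc]
  | cons x xs ih =>
      intro n
      simp only [List.map_cons, PySem.List.enumerate_cons, List.map_cons, sqdqProc]
      rw [ih (n + 1)]
      have hpar : ((n + 1) % 2 != 0) = !(n % 2 != 0) := by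
        have h2 : n % 2 = 0 ∨ n % 2 = 1 := Int.emod_two_eq_zero_or_one n
        rcases h2 with h | h <;> simp [Int.add_emod, h]
      rw [hpar]
      by_cases h : n % 2 = 0
      · simp [h, sqdqRepSeg, sqdqRep]
      · have hb : (n % 2 == 0) = false := by simpa using h
        have hb' : (n % 2 != 0) = true := by simp [bne, hb]
        simp [hb, hb']

-- ===== VERDICT (by name: the statement is the Claim_ definition above) =====
theorem singleQuoteToDoubleQuote_spec : Claim_equal_singleQuoteToDoubleQuote := by
  intro s _
  unfold Spec_singleQuoteToDoubleQuote singleQuoteToDoubleQuote singleQuoteToDoubleQuote_alt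
  simp only [PySem.Str.join, List.map_map]
  rw [goA_eq s.toList false false, splitOn_singleton]
  congr 1
  have h := enumerate_parity (sqdqSplit '"' s.toList) 0
  simp only [List.map_map] at h
  have h0 : ((0 : Int) % 2 != 0) = false := by decide
  rw [h0] at h
  rw [show ("\"".toList) = ['"'] from rfl]
  rw [← h]
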